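-- pv_equiv track=rewrite | github.com/opengauss-mirror/openGauss-DBMind | dbmind/components/cmd_exporter/log_module/log_miner/models/template_process.py | _get_compose_type
-- ===== SOURCE A (Python) =====
-- def _get_compose_type(word, compose_delimiters):
--     """
--     功能描述：判断给定单词的复合词类型
--     参数：
--         word：单词
--         compose_delimiters：复合词的连接词列表
--     返回值：
--         0: 非复合词
--         1：纯字母+复合词连接词
--         2：字母+数字+复合词连接词
--     """
--     compose_type = 0
--     if any(char.isalpha() for char in word):
--         if all(char.isalpha() or char in compose_delimiters for char in word):
--             compose_type = 1
--         elif all(char.isalnum() or char in compose_delimiters for char in word):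
--             compose_type = 2
--     return compose_type
-- ===== SOURCE B (Python) =====
-- def _get_compose_type(word, compose_delimiters):
--     has_alpha = False
--     all_alpha_or_delim = True
--     all_alnum_or_delim = True
--     for char in word:
--         if char.isalpha():
--             has_alpha = True
--         else:
--             is_delim = char in compose_delimiters
--             if not is_delim:
--                 all_alpha_or_delim = False
--                 if not char.isalnum():
--                     all_alnum_or_delim = False
--     if not has_alpha:
--         return 0
--     if all_alpha_or_delim:
--         return 1
--     if all_alnum_or_delim:
--         return 2
--     return 0
-- ===== Notes on version B (the rewrite author's own statement) =====
-- stated objective: alternative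
-- what changed: Replaces A's three separate generator scans (any + two all) with a single loop over the characters maintaining three boolean flags, then classifies from the flags.
import Mathlib
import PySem

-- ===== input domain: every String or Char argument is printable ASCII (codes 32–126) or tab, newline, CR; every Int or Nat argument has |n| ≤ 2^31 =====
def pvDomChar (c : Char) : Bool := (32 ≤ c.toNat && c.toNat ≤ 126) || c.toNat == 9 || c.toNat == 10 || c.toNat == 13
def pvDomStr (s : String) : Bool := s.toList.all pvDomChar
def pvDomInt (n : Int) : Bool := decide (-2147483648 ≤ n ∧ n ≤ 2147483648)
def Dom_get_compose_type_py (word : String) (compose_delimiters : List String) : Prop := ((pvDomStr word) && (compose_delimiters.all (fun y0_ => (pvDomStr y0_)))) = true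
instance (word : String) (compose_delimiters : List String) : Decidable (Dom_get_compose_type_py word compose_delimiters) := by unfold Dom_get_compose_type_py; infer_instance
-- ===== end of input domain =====

-- B replaces A's three separate character scans (any + two all) with a single
-- fold over the characters accumulating three boolean flags (alternative decomposition, same cost).


-- ===== PORT A =====
-- 'char in compose_delimiters': char is a one-character string compared against each delimiter
def get_compose_type_py (word : String) (compose_delimiters : List String) : Int :=
  let compose_type : Int := 0
  if word.toList.any (fun c => PySem.Chars.isalpha c) then
    if word.toList.all (fun c => PySem.Chars.isalpha c || compose_delimiters.contains (String.ofList [c])) then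
      (1 : Int)
    else if word.toList.all (fun c => PySem.Chars.isalnum c || compose_delimiters.contains (String.ofList [c])) then
      (2 : Int)
    else compose_type
  else compose_type

-- ===== PORT B =====
-- state = (has_alpha, all_alpha_or_delim, all_alnum_or_delim)
def get_compose_type_py_alt (word : String) (compose_delimiters : List String) : Int :=
  let st := word.toList.foldl
    (fun (s : Bool × Bool × Bool) c =>
      if PySem.Chars.isalpha c then (true, s.2.1, s.2.2)
      else if compose_delimiters.contains (String.ofList [c]) then s
      else if PySem.Chars.isalnum c then (s.1, false, s.2.2)
      else (s.1, false, false))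
    (false, true, true)
  if !st.1 then 0
  else if st.2.1 then 1
  else if st.2.2 then 2
  else 0

-- ===== PRECONDITION & SPEC =====
def Spec_get_compose_type_py (word : String) (compose_delimiters : List String) (out : Int) : Prop := out = get_compose_type_py_alt word compose_delimiters
instance (word : String) (compose_delimiters : List String) (out : Int) : Decidable (Spec_get_compose_type_py word compose_delimiters out) := by unfold Spec_get_compose_type_py; infer_instance

-- ===== CLAIM (what is proved, stated in full; the proofs are below) =====
def Claim_equal_get_compose_type_py : Prop := ∀ (word : String) (compose_delimiters : List String), Dom_get_compose_type_py word compose_delimiters → Spec_get_compose_type_py word compose_delimiters (get_compose_type_py word compose_delimiters)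

-- ===== LEMMAS AND PROOFS =====
lemma flags_fold (D : List String) (l : List Char) (a b c : Bool) :
    l.foldl
      (fun (s : Bool × Bool × Bool) c =>
        if PySem.Chars.isalpha c then (true, s.2.1, s.2.2)
        else if D.contains (String.ofList [c]) then s
        else if PySem.Chars.isalnum c then (s.1, false, s.2.2)
        else (s.1, false, false))
      (a, b, c)
    = (a || l.any (fun c => PySem.Chars.isalpha c),
       b && l.all (fun c => PySem.Chars.isalpha c || D.contains (String.ofList [c])),
       c && l.all (fun c => PySem.Chars.isalnum c || D.contains (String.ofList [c]))) := by
  induction l generalizing a b c with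
  | nil => simp
  | cons hd tl ih =>
    rw [List.foldl_cons]
    by_cases ha : PySem.Chars.isalpha hd = true
    · have han : PySem.Chars.isalnum hd = true := by
        simp [PySem.Chars.isalnum, ha]
      rw [if_pos ha, ih]
      simp [ha, han]
    · rw [if_neg ha]
      by_cases hd' : String.ofList [hd] ∈ D
      · rw [if_pos (by simpa using hd'), ih]
        simp [ha, hd']
      · rw [if_neg (by simpa using hd')]
        by_cases han : PySem.Chars.isalnum hd = true
        · rw [if_pos han, ih]
          simp [ha, hd', han]
        · rw [if_neg han, ih]
          simp [ha, hd', han]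

-- ===== VERDICT (by name: the statement is the Claim_ definition above) =====
theorem get_compose_type_py_spec : Claim_equal_get_compose_type_py := by
  intro word D _
  unfold Spec_get_compose_type_py get_compose_type_py get_compose_type_py_alt
  rw [flags_fold]
  simp only [Bool.false_or, Bool.true_and]
  by_cases h1 : word.toList.any (fun c => PySem.Chars.isalpha c) <;>
    by_cases h2 : word.toList.all (fun c => PySem.Chars.isalpha c || D.contains (String.ofList [c])) <;>
      by_cases h3 : word.toList.all (fun c => PySem.Chars.isalnum c || D.contains (String.ofList [c])) <;>
        simp [h1, h2, h3]
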